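-- pv_equiv track=rewrite | github.com/gastonfartek/aoc-2024 | day22/part2.py | solve
-- ===== SOURCE A (Python) =====
-- from collections import defaultdict
--
-- def perform_operations(n):
--     o = n
--     n = n * 64
--     n = o ^ n
--     n = n % 16777216
--     o = n // 32
--     n = o ^ n
--     n = n % 16777216
--     o = n * 2048
--     n = o ^ n
--     n = n % 16777216
--     return n
--
-- def solve(input_str: str):
--
--   nums = list(map(int, input_str.splitlines()))
--   seq = defaultdict(int)
--   for n in nums:
--       i = 0
--       numbers = []
--       seen = set()
--
--       while i < 2000:
--           numbers.append(n % 10)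
--           if len(numbers) > 4:
--             a,b,c,d,e = numbers[i-4:i+1]
--
--             s = (b-a,c-b,d-c,e-d)
--
--             if s not in seen:
--                 seq[s] += e
--
--             seen.add(s)
--
--           n = perform_operations(n)
--           i += 1
--
--   return max(*seq.values())
-- ===== SOURCE B (Python) =====
-- from collections import defaultdict
--
-- def _step(n):
--     n = (n ^ (n << 6)) % 16777216
--     n = (n ^ (n >> 5)) % 16777216
--     n = (n ^ (n << 11)) % 16777216
--     return n
--
-- def solve(input_str: str):
--     total = defaultdict(int)
--     for line in input_str.splitlines():
--         n = int(line)
--         prices = []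
--         for _ in range(2000):
--             prices.append(n % 10)
--             n = _step(n)
--         changes = [prices[i + 1] - prices[i] for i in range(len(prices) - 1)]
--         pairs = [((changes[i], changes[i + 1], changes[i + 2], changes[i + 3]),
--                   prices[i + 4])
--                  for i in range(len(changes) - 3)]
--         per = {}
--         for key, price in reversed(pairs):
--             per[key] = price          # earliest occurrence survives
--         for key, price in per.items():
--             total[key] += price
--     return max(*total.values())
-- ===== Notes on version B (the rewrite author's own statement) =====
-- stated objective: alternative
-- what changed: Per buyer, B first materialises the full 2000-price list and the consecutive-change list, then iterates the 4-change windows in REVERSE, overwriting a per-buyer dict so the earliest occurrence survives (eliminating A's forward `seen`-set guard and its per-step slicing), and finally folds each per-buyer dict into the global total; the trailing max(*total.values()) quirk is kept.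
import Mathlib
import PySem

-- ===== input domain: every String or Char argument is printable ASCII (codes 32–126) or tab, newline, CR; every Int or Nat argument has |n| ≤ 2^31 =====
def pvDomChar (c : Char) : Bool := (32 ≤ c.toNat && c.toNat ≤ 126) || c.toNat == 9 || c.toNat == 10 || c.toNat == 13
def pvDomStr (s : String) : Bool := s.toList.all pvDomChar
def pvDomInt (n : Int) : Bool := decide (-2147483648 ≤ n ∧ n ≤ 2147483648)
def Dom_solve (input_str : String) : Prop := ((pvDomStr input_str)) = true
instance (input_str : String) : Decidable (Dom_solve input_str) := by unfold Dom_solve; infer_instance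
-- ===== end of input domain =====

-- B materialises the full price/change lists per buyer and fills the per-buyer dict by a REVERSE
-- overwrite pass (earliest occurrence survives) instead of A's forward seen-set guard; same results.


-- ===== PORT A =====
def perform_operations (n : Int) : Int :=
  let o := n
  let n := n * 64
  let n := PySem.Int.bxor o n
  let n := PySem.Int.mod n 16777216
  let o := PySem.Int.floordiv n 32
  let n := PySem.Int.bxor o n
  let n := PySem.Int.mod n 16777216
  let o := n * 2048
  let n := PySem.Int.bxor o n
  let n := PySem.Int.mod n 16777216
  n

-- one iteration of A's while-loop body; state = (n, numbers, seen, seq), i the loop counter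
def solveStepA
    (st : Int × List Int × PySem.Set (Int × Int × Int × Int) × PySem.Dict (Int × Int × Int × Int) Int)
    (i : Int) :
    Int × List Int × PySem.Set (Int × Int × Int × Int) × PySem.Dict (Int × Int × Int × Int) Int :=
  let (n, numbers, seen, seq) := st
  let numbers := numbers ++ [PySem.Int.mod n 10]
  if 4 < PySem.List.len numbers then
    match PySem.List.slice numbers (some (i - 4)) (some (i + 1)) with
    | [a, b, c, d, e] =>
      let s := (b - a, c - b, d - c, e - d)
      let seq := if s ∈ seen then seq else seq.modify s 0 (· + e)
      (perform_operations n, numbers, PySem.Set.add seen s, seq)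
    | _ => (perform_operations n, numbers, seen, seq)  -- unreachable: the slice always has 5 elements
  else (perform_operations n, numbers, seen, seq)

def solve (input_str : String) : Int :=
  -- int(line): ofStr? none = ValueError, excluded by Pre_solve
  let nums := (PySem.Str.splitlines input_str).map (fun l => (PySem.Int.ofStr? l).getD 0)
  let seq := nums.foldl
    (fun seq n =>
      ((PySem.List.pyRange 0 2000 1).foldl solveStepA (n, [], PySem.Set.empty, seq)).2.2.2)
    PySem.Dict.empty
  -- max(*seq.values()): Python raises unless seq has ≥ 2 values — excluded by Pre_solve
  (PySem.List.max? seq.values (fun x => x)).getD 0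

-- ===== PORT B =====
def pvStep (n : Int) : Int :=
  let n := PySem.Int.mod (PySem.Int.bxor n (n <<< (6:Nat))) 16777216
  let n := PySem.Int.mod (PySem.Int.bxor n (n >>> (5:Nat))) 16777216
  let n := PySem.Int.mod (PySem.Int.bxor n (n <<< (11:Nat))) 16777216
  n

def solveBuyerB (total : PySem.Dict (Int × Int × Int × Int) Int) (line : String) :
    PySem.Dict (Int × Int × Int × Int) Int :=
  let n := (PySem.Int.ofStr? line).getD 0    -- int(line); ValueError excluded by Pre_solve
  let prices := ((PySem.List.pyRange 0 2000 1).foldl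
      (fun (st : Int × List Int) _ => (pvStep st.1, st.2 ++ [PySem.Int.mod st.1 10])) (n, [])).2
  let changes := (PySem.List.pyRange 0 (PySem.List.len prices - 1) 1).map
      (fun i => PySem.List.pyGetD prices (i + 1) 0 - PySem.List.pyGetD prices i 0)
  let pairs := (PySem.List.pyRange 0 (PySem.List.len changes - 3) 1).map
      (fun i => ((PySem.List.pyGetD changes i 0, PySem.List.pyGetD changes (i + 1) 0,
                  PySem.List.pyGetD changes (i + 2) 0, PySem.List.pyGetD changes (i + 3) 0),
                 PySem.List.pyGetD prices (i + 4) 0))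
  let per := pairs.reverse.foldl (fun d p => d.insert p.1 p.2) PySem.Dict.empty
  per.items.foldl (fun d p => d.modify p.1 0 (· + p.2)) total

def solve_alt (input_str : String) : Int :=
  let total := (PySem.Str.splitlines input_str).foldl solveBuyerB PySem.Dict.empty
  (PySem.List.max? total.values (fun x => x)).getD 0

-- ===== PRECONDITION & SPEC =====
-- Pre_solve is exactly where Python A returns: every line must parse as an int (else ValueError),
-- and some secret must not be ≡ 0 (mod 5·2^24) — a buyer's price stream is constant iff
-- 83886080 ∣ n, and with no non-constant buyer seq has < 2 values, so max(*seq.values())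
-- raises TypeError (also on empty input).
def Pre_solve (input_str : String) : Prop :=
  (∀ l ∈ PySem.Str.splitlines input_str, PySem.Int.ofStr? l ≠ none) ∧
  (∃ l ∈ PySem.Str.splitlines input_str, ¬ ((83886080 : Int) ∣ (PySem.Int.ofStr? l).getD 0))
instance (input_str : String) : Decidable (Pre_solve input_str) := by
  unfold Pre_solve; infer_instance

def pvWitness_solve : String := "607\n493"

def Spec_solve (input_str : String) (out : Int) : Prop := out = solve_alt input_str
instance (input_str : String) (out : Int) : Decidable (Spec_solve input_str out) := by
  unfold Spec_solve; infer_instance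

-- ===== CLAIM (what is proved, stated in full; the proofs are below) =====
def Claim_equal_solve : Prop :=
  ∀ (input_str : String), Dom_solve input_str → Pre_solve input_str →
    Spec_solve input_str (solve input_str)

-- ===== LEMMAS AND PROOFS =====

-- abbreviations for the proof (not used by the ports)
def pvIter (k : Nat) (n : Int) : Int := perform_operations^[k] n
def pvPrice (n : Int) (j : Nat) : Int := PySem.Int.mod (pvIter j n) 10
def pvCh (n : Int) (j : Nat) : Int := pvPrice n (j + 1) - pvPrice n j
def pvKey (n : Int) (j : Nat) : Int × Int × Int × Int :=
  (pvCh n j, pvCh n (j + 1), pvCh n (j + 2), pvCh n (j + 3))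
def pvPairsUpTo (n : Int) (m : Nat) : List ((Int × Int × Int × Int) × Int) :=
  (List.range m).map (fun j => (pvKey n j, pvPrice n (j + 4)))

-- first occurrences of keys, in order (what A's seen-guard keeps)
def dpAux {K V : Type} [DecidableEq K] : List (K × V) → List K → List (K × V)
  | [], _ => []
  | p :: rest, seen =>
    if p.1 ∈ seen then dpAux rest seen else p :: dpAux rest (p.1 :: seen)

def firstAt {K V : Type} [DecidableEq K] (l : List (K × V)) (k : K) : Option (K × V) :=
  l.find? (fun q => decide (q.1 = k))

-- the accumulation step both programs use on the global dict
def pvAcc {K : Type} [BEq K] (d : PySem.Dict K Int) (p : K × Int) : PySem.Dict K Int :=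
  d.modify p.1 0 (· + p.2)

theorem pvStep_eq (n : Int) : pvStep n = perform_operations n := by
  have h6 : ∀ m : Int, m <<< (6 : Nat) = m * 64 := fun m => by rw [Int.shiftLeft_eq]; norm_num
  have h11 : ∀ m : Int, m <<< (11 : Nat) = m * 2048 := fun m => by rw [Int.shiftLeft_eq]; norm_num
  have h5 : ∀ m : Int, m >>> (5 : Nat) = PySem.Int.floordiv m 32 := fun m => by
    rw [PySem.Int.floordiv_eq_ediv_of_pos (by norm_num), Int.shiftRight_eq_div_pow]; norm_num
  simp only [pvStep, perform_operations, h6, h11, h5]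
  rw [PySem.Int.bxor_comm _ (PySem.Int.floordiv _ 32), PySem.Int.bxor_comm _ (_ * 2048)]

theorem dpAux_snoc {K V : Type} [DecidableEq K] (l : List (K × V)) (p : K × V) (seen : List K) :
    dpAux (l ++ [p]) seen =
      dpAux l seen ++ (if p.1 ∈ seen ∨ p.1 ∈ l.map (·.1) then [] else [p]) := by
  induction l generalizing seen with
  | nil => simp [dpAux]
  | cons q l ih =>
    by_cases hq : q.1 ∈ seen
    · simp only [List.cons_append, dpAux, hq, if_pos, ih]
      have : (p.1 ∈ seen ∨ p.1 ∈ (q :: l).map (·.1)) ↔ (p.1 ∈ seen ∨ p.1 ∈ l.map (·.1)) := by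
        simp only [List.map_cons, List.mem_cons]
        constructor
        · rintro (h | h | h)
          · exact Or.inl h
          · exact Or.inl (h ▸ hq)
          · exact Or.inr h
        · tauto
      simp only [this]
    · simp only [List.cons_append, dpAux, hq, if_neg, ih, not_false_iff]
      have : (p.1 ∈ q.1 :: seen ∨ p.1 ∈ l.map (·.1)) ↔ (p.1 ∈ seen ∨ p.1 ∈ (q :: l).map (·.1)) := by
        simp only [List.mem_cons, List.map_cons]; tauto
      simp only [this]

theorem firstAt_cons_pos {K V : Type} [DecidableEq K] {q : K × V} {l : List (K × V)} {k : K}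
    (h : q.1 = k) : firstAt (q :: l) k = some q := by
  rw [firstAt, List.find?_cons_of_pos (by simp [h])]

theorem firstAt_cons_neg {K V : Type} [DecidableEq K] {q : K × V} {l : List (K × V)} {k : K}
    (h : q.1 ≠ k) : firstAt (q :: l) k = firstAt l k := by
  rw [firstAt, List.find?_cons_of_neg (by simp [h])]; rfl

theorem mem_dpAux {K V : Type} [DecidableEq K] (l : List (K × V)) (seen : List K) (p : K × V) :
    p ∈ dpAux l seen ↔ p.1 ∉ seen ∧ firstAt l p.1 = some p := by
  induction l generalizing seen with
  | nil => simp [dpAux, firstAt]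
  | cons q l ih =>
    show p ∈ (if q.1 ∈ seen then dpAux l seen else q :: dpAux l (q.1 :: seen)) ↔ _
    by_cases hqp : q.1 = p.1
    · by_cases hq : q.1 ∈ seen
      · rw [if_pos hq, ih, firstAt_cons_pos hqp]
        constructor
        · rintro ⟨hns, _⟩; exact absurd (hqp ▸ hq) hns
        · rintro ⟨hns, _⟩; exact absurd (hqp ▸ hq) hns
      · rw [if_neg hq, firstAt_cons_pos hqp]
        simp only [List.mem_cons, ih]
        constructor
        · rintro (rfl | ⟨hns, hf⟩)
          · exact ⟨hqp ▸ hq, rfl⟩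
          · exact absurd (List.mem_cons.mpr (Or.inl hqp.symm)) (by simpa using hns)
        · rintro ⟨hns, hf⟩
          obtain rfl : q = p := by injection hf
          exact Or.inl rfl
    · rw [firstAt_cons_neg hqp]
      by_cases hq : q.1 ∈ seen
      · rw [if_pos hq, ih]
      · rw [if_neg hq]
        simp only [List.mem_cons, ih]
        constructor
        · rintro (rfl | ⟨hns, hf⟩)
          · exact absurd rfl hqp
          · exact ⟨fun hm => (by simpa using hns : ¬(p.1 = q.1 ∨ p.1 ∈ seen)) (Or.inr hm), hf⟩
        · rintro ⟨hns, hf⟩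
          refine Or.inr ⟨?_, hf⟩
          simp only [not_or]
          exact ⟨fun h => hqp h.symm, hns⟩

theorem dpAux_keys_nodup {K V : Type} [DecidableEq K] (l : List (K × V)) (seen : List K) :
    ((dpAux l seen).map (·.1)).Nodup ∧ ∀ k ∈ (dpAux l seen).map (·.1), k ∉ seen := by
  induction l generalizing seen with
  | nil => simp [dpAux]
  | cons q l ih =>
    by_cases hq : q.1 ∈ seen
    · simpa [dpAux, hq] using ih seen
    · obtain ⟨h1, h2⟩ := ih (q.1 :: seen)
      refine ⟨?_, ?_⟩
      · simp only [dpAux, hq, if_neg, not_false_iff, List.map_cons, List.nodup_cons]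
        exact ⟨fun hm => (h2 _ hm) List.mem_cons_self, h1⟩
      · intro k hk
        simp only [dpAux, hq, if_neg, not_false_iff, List.map_cons, List.mem_cons] at hk
        rcases hk with rfl | hk
        · exact hq
        · exact fun hs => (h2 _ hk) (List.mem_cons_of_mem _ hs)

theorem revfold_get? {K V : Type} [DecidableEq K] [BEq K] [LawfulBEq K]
    (l : List (K × V)) (k : K) :
    ((l.reverse.foldl (fun d p => d.insert p.1 p.2) PySem.Dict.empty).get? k) =
      (firstAt l k).map (fun p => p.2) := by
  induction l with
  | nil => simp [firstAt, PySem.Dict.get?_empty]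
  | cons q l ih =>
    rw [List.reverse_cons, List.foldl_append]
    simp only [List.foldl_cons, List.foldl_nil, firstAt, List.find?_cons]
    rw [PySem.Dict.get?_insert]
    by_cases h : q.1 = k
    · simp [h]
    · have : (decide (q.1 = k)) = false := by simp [h]
      simp only [this, if_neg (fun hh : k = q.1 => h hh.symm)]
      exact ih

theorem getD_foldl_pvAcc {K : Type} [DecidableEq K] [BEq K] [LawfulBEq K]
    (l : List (K × Int)) (d : PySem.Dict K Int) (k : K) :
    (l.foldl pvAcc d).getD k 0 = d.getD k 0 + ((l.filter (fun p => decide (p.1 = k))).map (·.2)).sum := by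
  induction l generalizing d with
  | nil => simp
  | cons p l ih =>
    simp only [List.foldl_cons, List.filter_cons]
    rw [ih]
    by_cases h : p.1 = k
    · simp only [h, decide_true, if_pos, List.map_cons, List.sum_cons, pvAcc,
        PySem.Dict.getD_modify]
      ring
    · have hd : (decide (p.1 = k)) = false := by simp [h]
      simp only [hd, Bool.false_eq_true, pvAcc]
      rw [PySem.Dict.getD_modify, if_neg (fun hh : k = p.1 => h hh.symm)]
      simp

-- A's buyer loop, fully characterised
theorem buyerA_loop (n0 : Int) (seq0 : PySem.Dict (Int × Int × Int × Int) Int) (N : Nat) :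
    ((List.range N).foldl (fun st (i : Nat) => solveStepA st (i : Int))
        (n0, ([] : List Int), PySem.Set.empty, seq0)) =
      (pvIter N n0, (List.range N).map (pvPrice n0),
       PySem.Set.ofList ((pvPairsUpTo n0 (N - 4)).map (·.1)),
       (dpAux (pvPairsUpTo n0 (N - 4)) []).foldl pvAcc seq0) := by
  induction N with
  | zero => simp [pvIter, pvPairsUpTo, dpAux, PySem.Set.empty, PySem.Set.ofList]
  | succ N ih =>
    rw [List.range_succ, List.foldl_append, ih]
    simp only [List.foldl_cons, List.foldl_nil]
    have hnum : (List.range N).map (pvPrice n0) ++ [PySem.Int.mod (pvIter N n0) 10] =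
        (List.range (N + 1)).map (pvPrice n0) := by
      rw [List.range_succ, List.map_append]; rfl
    have hiter : perform_operations (pvIter N n0) = pvIter (N + 1) n0 :=
      (Function.iterate_succ_apply' perform_operations N n0).symm
    by_cases h4 : 4 ≤ N
    · -- a full window exists this iteration
      have hsplit : List.range (N + 1) = List.range (N - 4) ++ (List.range 5).map (N - 4 + ·) := by
        rw [← List.range_add]
        congr 1
        omega
      have hslice : PySem.List.slice ((List.range (N + 1)).map (pvPrice n0))
          (some ((N : Int) - 4)) (some ((N : Int) + 1)) =
          [pvPrice n0 (N - 4), pvPrice n0 (N - 4 + 1), pvPrice n0 (N - 4 + 2),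
           pvPrice n0 (N - 4 + 3), pvPrice n0 (N - 4 + 4)] := by
        have e1 : (N : Int) - 4 = ((N - 4 : Nat) : Int) := by omega
        have e2 : (N : Int) + 1 = ((N + 1 : Nat) : Int) := by omega
        rw [e1, e2, PySem.List.slice_natCast]
        have e3 : N + 1 - (N - 4) = 5 := by omega
        rw [e3, hsplit, List.map_append]
        rw [List.drop_left' (by simp)]
        rw [List.take_of_length_le (by simp)]
        simp [List.range_succ]
      have hguard : (4 : Int) < (N : Int) + 1 := by omega
      have hlen' : PySem.List.len ((List.range (N + 1)).map (pvPrice n0)) = ((N : Int) + 1) := by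
        rw [PySem.List.len_eq]; simp
      have hpairs : pvPairsUpTo n0 (N + 1 - 4) =
          pvPairsUpTo n0 (N - 4) ++ [(pvKey n0 (N - 4), pvPrice n0 (N - 4 + 4))] := by
        have : N + 1 - 4 = (N - 4) + 1 := by omega
        rw [this, pvPairsUpTo, List.range_succ, List.map_append, ← pvPairsUpTo]
        rfl
      simp only [solveStepA, hnum, hslice]
      rw [hlen', if_pos hguard]
      rw [hiter, hpairs, dpAux_snoc, List.foldl_append]
      have hkey_eq : (pvPrice n0 (N - 4 + 1) - pvPrice n0 (N - 4),
          pvPrice n0 (N - 4 + 2) - pvPrice n0 (N - 4 + 1),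
          pvPrice n0 (N - 4 + 3) - pvPrice n0 (N - 4 + 2),
          pvPrice n0 (N - 4 + 4) - pvPrice n0 (N - 4 + 3)) = pvKey n0 (N - 4) := rfl
      rw [hkey_eq]
      refine congrArg₂ Prod.mk rfl (congrArg₂ Prod.mk ?_ (congrArg₂ Prod.mk ?_ ?_))
      · rw [← List.range_succ]
      · rw [List.map_append]
        simp [PySem.Set.ofList_append_singleton]
      · by_cases hin : (pvKey n0 (N - 4)) ∈ (pvPairsUpTo n0 (N - 4)).map (·.1)
        · rw [if_pos ((PySem.Set.mem_ofList _ _).mpr hin), if_pos (by simpa using hin),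
            List.foldl_nil]
        · rw [if_neg (fun hc => hin ((PySem.Set.mem_ofList _ _).mp hc)),
            if_neg (by simpa using hin)]
          rfl
    · -- no window yet (N < 4)
      have hguard : ¬ ((4 : Int) < (N : Int) + 1) := by omega
      have hpairs : N + 1 - 4 = N - 4 := by omega
      simp only [solveStepA, hnum, hiter, hpairs]
      have hlen' : PySem.List.len ((List.range (N + 1)).map (pvPrice n0)) = ((N : Int) + 1) := by
        rw [PySem.List.len_eq]; simp
      rw [hlen', if_neg hguard, ← List.range_succ]

theorem buyerA_eq (n0 : Int) (seq0 : PySem.Dict (Int × Int × Int × Int) Int) :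
    ((PySem.List.pyRange 0 2000 1).foldl solveStepA (n0, [], PySem.Set.empty, seq0)).2.2.2 =
      (dpAux (pvPairsUpTo n0 1996) []).foldl pvAcc seq0 := by
  rw [show (2000 : Int) = ((2000 : Nat) : Int) by norm_num, PySem.List.pyRange_zero_natCast,
    List.foldl_map, buyerA_loop]

theorem buyerB_prices' (n : Int) (N : Nat) :
    ((List.range N).foldl
        (fun (st : Int × List Int) (_ : Nat) => (pvStep st.1, st.2 ++ [PySem.Int.mod st.1 10]))
        (n, ([] : List Int))) = (pvIter N n, (List.range N).map (pvPrice n)) := by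
  induction N with
  | zero => simp [pvIter]
  | succ N ih =>
    rw [List.range_succ, List.foldl_append, ih]
    simp only [List.foldl_cons, List.foldl_nil]
    rw [pvStep_eq]
    refine congrArg₂ Prod.mk (Function.iterate_succ_apply' perform_operations N n).symm ?_
    rw [List.map_append]
    rfl

theorem map_pyRange_natCast {B : Type} (m : Nat) (f : Int → B) (g : Nat → B)
    (h : ∀ k, k < m → f (k : Int) = g k) :
    (PySem.List.pyRange 0 (m : Int) 1).map f = (List.range m).map g := by
  rw [PySem.List.pyRange_zero_natCast, List.map_map]
  exact List.map_congr_left (fun a ha => h a (List.mem_range.mp ha))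

theorem buyerB_prices_pyRange (n : Int) :
    ((PySem.List.pyRange 0 2000 1).foldl
        (fun (st : Int × List Int) (_ : Int) => (pvStep st.1, st.2 ++ [PySem.Int.mod st.1 10]))
        (n, ([] : List Int))) =
      (pvIter 2000 n, (List.range 2000).map (pvPrice n)) := by
  rw [show (2000 : Int) = ((2000 : Nat) : Int) by norm_num, PySem.List.pyRange_zero_natCast,
    List.foldl_map]
  exact buyerB_prices' n 2000

set_option maxRecDepth 8192 in
theorem buyerB_eq (total : PySem.Dict (Int × Int × Int × Int) Int) (line : String) :
    solveBuyerB total line =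
      (((pvPairsUpTo ((PySem.Int.ofStr? line).getD 0) 1996).reverse.foldl
          (fun d p => d.insert p.1 p.2) PySem.Dict.empty).items).foldl pvAcc total := by
  simp only [solveBuyerB]
  generalize (PySem.Int.ofStr? line).getD 0 = n
  rw [buyerB_prices_pyRange]
  have hlenp : PySem.List.len ((pvIter 2000 n, (List.range 2000).map (pvPrice n)).2) = (2000 : Int) := by
    rw [PySem.List.len_eq]; simp
  rw [hlenp, show (2000 : Int) - 1 = ((1999 : Nat) : Int) by norm_num]
  rw [map_pyRange_natCast 1999 _ (pvCh n) (by
    intro k hk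
    simp only
    rw [show ((k : Int) + 1) = ((k + 1 : Nat) : Int) by push_cast; ring]
    rw [PySem.List.pyGetD_natCast, PySem.List.pyGetD_natCast,
      PySem.List.getD_map_range _ _ _ _ (by omega), PySem.List.getD_map_range _ _ _ _ (by omega)]
    rfl)]
  have hlenc : PySem.List.len ((List.range 1999).map (pvCh n)) = (1999 : Int) := by
    rw [PySem.List.len_eq]; simp
  rw [hlenc, show (1999 : Int) - 3 = ((1996 : Nat) : Int) by norm_num]
  rw [map_pyRange_natCast 1996 _ (fun j => (pvKey n j, pvPrice n (j + 4))) (by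
    intro k hk
    simp only
    rw [show ((k : Int) + 1) = ((k + 1 : Nat) : Int) by push_cast; ring,
      show ((k : Int) + 2) = ((k + 2 : Nat) : Int) by push_cast; ring,
      show ((k : Int) + 3) = ((k + 3 : Nat) : Int) by push_cast; ring,
      show ((k : Int) + 4) = ((k + 4 : Nat) : Int) by push_cast; ring]
    rw [PySem.List.pyGetD_natCast, PySem.List.pyGetD_natCast, PySem.List.pyGetD_natCast,
      PySem.List.pyGetD_natCast, PySem.List.pyGetD_natCast,
      PySem.List.getD_map_range _ _ _ _ (by omega), PySem.List.getD_map_range _ _ _ _ (by omega),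
      PySem.List.getD_map_range _ _ _ _ (by omega), PySem.List.getD_map_range _ _ _ _ (by omega),
      PySem.List.getD_map_range _ _ _ _ (by omega)]
    rfl)]
  rfl

theorem firstAt_fst {K V : Type} [DecidableEq K] {l : List (K × V)} {k : K} {q : K × V}
    (h : firstAt l k = some q) : q.1 = k := by
  have := List.find?_some h
  simpa using this

theorem dp_perm_items {K V : Type} [DecidableEq K] [BEq K] [LawfulBEq K] (ps : List (K × V)) :
    (dpAux ps []).Perm
      ((ps.reverse.foldl (fun d p => d.insert p.1 p.2) PySem.Dict.empty).items) := by
  have hndp : (dpAux ps ([] : List K)).Nodup := (dpAux_keys_nodup ps []).1.of_map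
  have hkeys : (ps.reverse.foldl (fun d p => d.insert p.1 p.2) PySem.Dict.empty).keys.Nodup :=
    PySem.Dict.nodup_keys_foldl_insert_key ps.reverse (·.1) (fun _ p => p.2) PySem.Dict.empty
      (by simp)
  have hitems : ((ps.reverse.foldl (fun d p => d.insert p.1 p.2) PySem.Dict.empty).items).Nodup := by
    have := hkeys
    simp only [PySem.Dict.keys] at this
    exact this.of_map
  rw [List.perm_ext_iff_of_nodup hndp hitems]
  intro p
  rw [mem_dpAux]
  simp only [List.not_mem_nil, not_false_iff, true_and]
  rw [← PySem.Dict.get?_eq_some_iff_mem_items _ _ _ hkeys, revfold_get?]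
  constructor
  · intro h; rw [h]; rfl
  · intro h
    match hf : firstAt ps p.1 with
    | none => rw [hf] at h; simp at h
    | some q =>
      rw [hf] at h
      have hq2 : q.2 = p.2 := by simpa using h
      have hq1 : q.1 = p.1 := firstAt_fst hf
      exact congrArg some (Prod.ext hq1 hq2)

-- the cross-program invariant
def pvRel (d1 d2 : PySem.Dict (Int × Int × Int × Int) Int) : Prop :=
  d1.keys.Nodup ∧ d2.keys.Nodup ∧ d1.keys.Perm d2.keys ∧ ∀ k, d1.getD k 0 = d2.getD k 0

theorem pvRel_step (d1 d2 : PySem.Dict (Int × Int × Int × Int) Int)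
    (l1 l2 : List ((Int × Int × Int × Int) × Int)) (hp : l1.Perm l2) (h : pvRel d1 d2) :
    pvRel (l1.foldl pvAcc d1) (l2.foldl pvAcc d2) := by
  obtain ⟨hn1, hn2, hperm, hval⟩ := h
  have hk1 : (l1.foldl pvAcc d1).keys = PySem.Set.update d1.keys (l1.map (·.1)) :=
    PySem.Dict.keys_foldl_modify_key l1 (·.1) 0 (fun _ p => (· + p.2)) d1
  have hk2 : (l2.foldl pvAcc d2).keys = PySem.Set.update d2.keys (l2.map (·.1)) :=
    PySem.Dict.keys_foldl_modify_key l2 (·.1) 0 (fun _ p => (· + p.2)) d2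
  have hnd1 : (l1.foldl pvAcc d1).keys.Nodup :=
    PySem.Dict.nodup_keys_foldl_modify_key l1 (·.1) 0 (fun _ p => (· + p.2)) d1 hn1
  have hnd2 : (l2.foldl pvAcc d2).keys.Nodup :=
    PySem.Dict.nodup_keys_foldl_modify_key l2 (·.1) 0 (fun _ p => (· + p.2)) d2 hn2
  refine ⟨hnd1, hnd2, ?_, ?_⟩
  · rw [List.perm_ext_iff_of_nodup hnd1 hnd2]
    intro k
    rw [hk1, hk2, PySem.Set.mem_update, PySem.Set.mem_update, hperm.mem_iff,
      (hp.map (·.1)).mem_iff]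
  · intro k
    rw [getD_foldl_pvAcc, getD_foldl_pvAcc, hval k,
      ((hp.filter (fun p => decide (p.1 = k))).map (·.2)).sum_eq]

theorem pvRel_values (d1 d2 : PySem.Dict (Int × Int × Int × Int) Int) (h : pvRel d1 d2) :
    d1.values.Perm d2.values := by
  obtain ⟨hn1, hn2, hperm, hval⟩ := h
  rw [PySem.Dict.values_eq_map_keys d1 hn1 0, PySem.Dict.values_eq_map_keys d2 hn2 0]
  have : (fun k => d1.getD k 0) = fun k => d2.getD k 0 := funext hval
  rw [this]
  exact hperm.map _

theorem max?_perm (xs ys : List Int) (h : xs.Perm ys) :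
    PySem.List.max? xs (fun x => x) = PySem.List.max? ys (fun x => x) := by
  match hx : PySem.List.max? xs (fun x => x), hy : PySem.List.max? ys (fun x => x) with
  | none, none => rfl
  | none, some m =>
    rw [PySem.List.max?_eq_none_iff] at hx
    subst hx
    rw [(PySem.List.max?_eq_none_iff _ _).mpr (List.Perm.eq_nil h.symm)] at hy
    exact absurd hy (by simp)
  | some m, none =>
    rw [PySem.List.max?_eq_none_iff] at hy
    subst hy
    rw [(PySem.List.max?_eq_none_iff _ _).mpr (List.Perm.eq_nil h)] at hx
    exact absurd hx (by simp)
  | some m, some m' =>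
    have hm := PySem.List.max?_mem hx
    have hm' := PySem.List.max?_mem hy
    have h1 := PySem.List.max?_isMax hy m (h.mem_iff.mp hm)
    have h2 := PySem.List.max?_isMax hx m' (h.mem_iff.mpr hm')
    exact congrArg some (le_antisymm h1 h2)

-- ===== VERDICT (by name: the statement is the Claim_ definition above) =====
theorem foldl_rel {S1 S2 A : Type} (R : S1 → S2 → Prop) (f : S1 → A → S1) (g : S2 → A → S2)
    (hstep : ∀ s1 s2 a, R s1 s2 → R (f s1 a) (g s2 a)) :
    ∀ (l : List A) (s1 : S1) (s2 : S2), R s1 s2 → R (l.foldl f s1) (l.foldl g s2) := by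
  intro l
  induction l with
  | nil => intro s1 s2 h; exact h
  | cons a l ih => intro s1 s2 h; exact ih _ _ (hstep _ _ _ h)

set_option maxRecDepth 16384 in
theorem solve_spec : Claim_equal_solve := by
  unfold Claim_equal_solve
  intro input_str _dom _pre
  unfold Spec_solve solve solve_alt
  have hB : solveBuyerB = fun d l =>
      (((pvPairsUpTo ((PySem.Int.ofStr? l).getD 0) 1996).reverse.foldl
          (fun d p => d.insert p.1 p.2) PySem.Dict.empty).items).foldl pvAcc d :=
    funext (fun d => funext (fun l => buyerB_eq d l))
  rw [hB]
  simp only [List.foldl_map, buyerA_eq]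
  generalize (1996 : Nat) = M
  have hrel : ∀ (ls : List String) (d1 d2 : PySem.Dict (Int × Int × Int × Int) Int),
      pvRel d1 d2 →
      pvRel (ls.foldl (fun seq l =>
              (dpAux (pvPairsUpTo ((PySem.Int.ofStr? l).getD 0) M) []).foldl pvAcc seq) d1)
            (ls.foldl (fun d l =>
              (((pvPairsUpTo ((PySem.Int.ofStr? l).getD 0) M).reverse.foldl
                  (fun d p => d.insert p.1 p.2) PySem.Dict.empty).items).foldl pvAcc d) d2) :=
    foldl_rel pvRel _ _ (fun d1 d2 l h => pvRel_step _ _ _ _ (dp_perm_items _) h)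
  have h0 : pvRel PySem.Dict.empty PySem.Dict.empty := by
    refine ⟨?_, ?_, ?_, fun k => rfl⟩ <;> simp [PySem.Dict.keys_empty]
  rw [max?_perm _ _ (pvRel_values _ _ (hrel _ _ _ h0))]
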